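-- pv_equiv track=rewrite | github.com/hoangtien07/SCA | src/collectors/semantic_scholar.py | _map_study_type
-- ===== SOURCE A (Python) =====
-- def _map_study_type(pub_types: list[str]) -> str:
--     """Map Semantic Scholar publication types to our evidence vocabulary."""
--     types_lower = [t.lower() for t in pub_types]
--     if any("review" in t for t in types_lower):
--         return "review"
--     if any("clinical" in t or "trial" in t for t in types_lower):
--         return "RCT"
--     if any("case" in t for t in types_lower):
--         return "case_report"
--     return "research_article"
-- ===== SOURCE B (Python) =====
-- def _map_study_type(pub_types: list[str]) -> str:
--     """Map Semantic Scholar publication types to our evidence vocabulary.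
--
--     Single accumulating pass with an ordered priority table instead of
--     four separate full scans.
--     """
--     table = [["review"], ["clinical", "trial"], ["case"]]
--     cats = ["review", "RCT", "case_report", "research_article"]
--     best = 3
--     for t in pub_types:
--         tl = t.lower()
--         for i, kws in enumerate(table):
--             if i < best and any(k in tl for k in kws):
--                 best = i
--                 break
--     return cats[best]
-- ===== Notes on version B (the rewrite author's own statement) =====
-- stated objective: alternative
-- what changed: Replaced A's four separate any-scans over the whole lowered list by one ordered keyword/priority table and a single accumulating pass that tracks the minimum matching priority per type.
import Mathlib
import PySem

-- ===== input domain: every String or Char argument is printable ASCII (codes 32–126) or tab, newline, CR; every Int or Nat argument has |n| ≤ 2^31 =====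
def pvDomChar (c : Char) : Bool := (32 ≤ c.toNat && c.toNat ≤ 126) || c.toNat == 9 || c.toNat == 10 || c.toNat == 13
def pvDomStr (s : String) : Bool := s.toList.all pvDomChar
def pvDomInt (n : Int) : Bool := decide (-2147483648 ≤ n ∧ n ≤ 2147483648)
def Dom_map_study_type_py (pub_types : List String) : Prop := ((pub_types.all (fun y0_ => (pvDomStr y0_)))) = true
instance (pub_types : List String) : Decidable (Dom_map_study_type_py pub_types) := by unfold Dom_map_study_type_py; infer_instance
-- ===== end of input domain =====

-- B replaces A's four separate any-scans by one ordered keyword/priority table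
-- and a single accumulating pass tracking the minimum matching priority (alternative decomposition, same cost).


-- ===== PORT A =====
def map_study_type_py (pub_types : List String) : String :=
  let types_lower := pub_types.map (fun t => PySem.Str.lower t)
  if types_lower.any (fun t => PySem.Str.isIn "review" t) then "review"
  else if types_lower.any (fun t => PySem.Str.isIn "clinical" t || PySem.Str.isIn "trial" t) then "RCT"
  else if types_lower.any (fun t => PySem.Str.isIn "case" t) then "case_report"
  else "research_article"

-- ===== PORT B =====
def pvTable : List (List String) := [["review"], ["clinical", "trial"], ["case"]]
def pvCats : List String := ["review", "RCT", "case_report", "research_article"]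

-- inner loop: 'for i, kws in enumerate(table): if i < best and any(...): best = i; break'
def pvScan (tl : String) (i : Nat) (best : Nat) : List (List String) → Nat
  | [] => best
  | kws :: rest =>
    if i < best && kws.any (fun k => PySem.Str.isIn k tl) then i
    else pvScan tl (i + 1) best rest

def map_study_type_py_alt (pub_types : List String) : String :=
  let best := pub_types.foldl (fun best t => pvScan (PySem.Str.lower t) 0 best pvTable) 3
  pvCats.getD best ""

-- ===== PRECONDITION & SPEC =====
def Spec_map_study_type_py (pub_types : List String) (out : String) : Prop := out = map_study_type_py_alt pub_types
instance (pub_types : List String) (out : String) : Decidable (Spec_map_study_type_py pub_types out) := by unfold Spec_map_study_type_py; infer_instance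

-- ===== CLAIM (what is proved, stated in full; the proofs are below) =====
def Claim_equal_map_study_type_py : Prop := ∀ (pub_types : List String), Dom_map_study_type_py pub_types → Spec_map_study_type_py pub_types (map_study_type_py pub_types)

-- ===== LEMMAS AND PROOFS =====

-- priority of an (already lowered) type string
def pvPrio (tl : String) : Nat :=
  if PySem.Str.isIn "review" tl then 0
  else if PySem.Str.isIn "clinical" tl || PySem.Str.isIn "trial" tl then 1
  else if PySem.Str.isIn "case" tl then 2
  else 3

lemma pvScan_eq_min (tl : String) (best : Nat) (hb : best ≤ 3) :
    pvScan tl 0 best pvTable = min best (pvPrio tl) := by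
  simp only [pvTable, pvScan, pvPrio, List.any_cons, List.any_nil, Bool.or_false]
  by_cases h0 : PySem.Str.isIn "review" tl <;>
  by_cases h1 : PySem.Str.isIn "clinical" tl <;>
  by_cases h2 : PySem.Str.isIn "trial" tl <;>
  by_cases h3 : PySem.Str.isIn "case" tl <;>
    simp only [h0, h1, h2, h3, Bool.or_true, Bool.or_false, Bool.and_true, Bool.and_false,
      if_true, if_false, Bool.false_eq_true, decide_eq_true_eq, Nat.min_def] <;>
    split_ifs <;> omega

lemma pvFold_le_iff (l : List String) (b n : Nat) :
    l.foldl (fun a t => min a (pvPrio (PySem.Str.lower t))) b ≤ n ↔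
      b ≤ n ∨ ∃ t ∈ l, pvPrio (PySem.Str.lower t) ≤ n := by
  induction l generalizing b with
  | nil => simp
  | cons x xs ih =>
    simp only [List.foldl_cons, ih, List.mem_cons]
    constructor
    · rintro (h | ⟨t, ht, hp⟩)
      · rcases min_le_iff.mp h with h' | h'
        · exact Or.inl h'
        · exact Or.inr ⟨x, Or.inl rfl, h'⟩
      · exact Or.inr ⟨t, Or.inr ht, hp⟩
    · rintro (h | ⟨t, ht | ht, hp⟩)
      · exact Or.inl (le_trans (min_le_left _ _) h)
      · subst ht; exact Or.inl (le_trans (min_le_right _ _) hp)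
      · exact Or.inr ⟨t, ht, hp⟩

lemma pvPrio_le_zero (tl : String) : pvPrio tl ≤ 0 ↔ PySem.Str.isIn "review" tl = true := by
  unfold pvPrio; split_ifs <;> simp_all

lemma pvPrio_le_one (tl : String) :
    pvPrio tl ≤ 1 ↔ (PySem.Str.isIn "review" tl ||
      (PySem.Str.isIn "clinical" tl || PySem.Str.isIn "trial" tl)) = true := by
  unfold pvPrio; split_ifs <;> simp_all

lemma pvPrio_le_two (tl : String) :
    pvPrio tl ≤ 2 ↔ (PySem.Str.isIn "review" tl ||
      (PySem.Str.isIn "clinical" tl || PySem.Str.isIn "trial" tl) ||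
      PySem.Str.isIn "case" tl) = true := by
  unfold pvPrio; split_ifs <;> simp_all

lemma pvFold_eq (l : List String) (b : Nat) (hb : b ≤ 3) :
    l.foldl (fun best t => pvScan (PySem.Str.lower t) 0 best pvTable) b =
      l.foldl (fun a t => min a (pvPrio (PySem.Str.lower t))) b := by
  induction l generalizing b with
  | nil => rfl
  | cons x xs ih =>
    simp only [List.foldl_cons, pvScan_eq_min _ _ hb]
    exact ih _ (le_trans (min_le_left _ _) hb)

lemma pvAlt_eq (l : List String) :
    map_study_type_py_alt l =
      pvCats.getD (l.foldl (fun a t => min a (pvPrio (PySem.Str.lower t))) 3) "" := by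
  unfold map_study_type_py_alt
  rw [pvFold_eq l 3 le_rfl]

-- ===== VERDICT (by name: the statement is the Claim_ definition above) =====
theorem map_study_type_py_spec : Claim_equal_map_study_type_py := by
  intro l _
  show map_study_type_py l = map_study_type_py_alt l
  rw [pvAlt_eq]
  unfold map_study_type_py
  set m := l.foldl (fun a t => min a (pvPrio (PySem.Str.lower t))) 3 with hm
  have hle : ∀ n, m ≤ n ↔ 3 ≤ n ∨ ∃ t ∈ l, pvPrio (PySem.Str.lower t) ≤ n := by
    intro n; rw [hm]; exact pvFold_le_iff l 3 n
  have h3 : m ≤ 3 := (hle 3).mpr (Or.inl le_rfl)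
  simp only [List.any_map, Function.comp_def]
  by_cases hr : l.any (fun t => PySem.Str.isIn "review" (PySem.Str.lower t))
  · obtain ⟨t, ht, hp⟩ := List.any_eq_true.mp hr
    have hm0 : m = 0 :=
      Nat.le_zero.mp ((hle 0).mpr (Or.inr ⟨t, ht, (pvPrio_le_zero _).mpr hp⟩))
    simp only [hr, if_true]; simp [hm0, pvCats]
  · rw [Bool.not_eq_true] at hr
    have hrnot : ∀ t ∈ l, ¬ PySem.Str.isIn "review" (PySem.Str.lower t) = true := by
      simpa [List.any_eq_true] using hr
    by_cases hc : l.any (fun t => PySem.Str.isIn "clinical" (PySem.Str.lower t) || PySem.Str.isIn "trial" (PySem.Str.lower t))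
    · obtain ⟨t, ht, hp⟩ := List.any_eq_true.mp hc
      have hm1 : m ≤ 1 :=
        (hle 1).mpr (Or.inr ⟨t, ht, (pvPrio_le_one _).mpr (Bool.or_inr hp)⟩)
      have hm0 : ¬ m ≤ 0 := by
        intro h
        rcases (hle 0).mp h with h' | ⟨t', ht', hp'⟩
        · omega
        · exact hrnot t' ht' ((pvPrio_le_zero _).mp hp')
      have : m = 1 := by omega
      simp only [hr, hc, Bool.false_eq_true, if_false, if_true]; simp [this, pvCats]
    · rw [Bool.not_eq_true] at hc
      have hcnot : ∀ t ∈ l, ¬ (PySem.Str.isIn "clinical" (PySem.Str.lower t) || PySem.Str.isIn "trial" (PySem.Str.lower t)) = true := by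
        simpa [List.any_eq_true] using hc
      by_cases hk : l.any (fun t => PySem.Str.isIn "case" (PySem.Str.lower t))
      · obtain ⟨t, ht, hp⟩ := List.any_eq_true.mp hk
        have hm2 : m ≤ 2 :=
          (hle 2).mpr (Or.inr ⟨t, ht, (pvPrio_le_two _).mpr (Bool.or_inr hp)⟩)
        have hm1 : ¬ m ≤ 1 := by
          intro h
          rcases (hle 1).mp h with h' | ⟨t', ht', hp'⟩
          · omega
          · have := (pvPrio_le_one _).mp hp'
            simp only [Bool.or_eq_true] at this
            rcases this with h1 | h2
            · exact hrnot t' ht' h1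
            · exact hcnot t' ht' (Bool.or_eq_true_iff.mpr h2)
        have : m = 2 := by omega
        simp only [hr, hc, hk, Bool.false_eq_true, if_false]; simp [this, pvCats]
      · rw [Bool.not_eq_true] at hk
        have hknot : ∀ t ∈ l, ¬ PySem.Str.isIn "case" (PySem.Str.lower t) = true := by
          simpa [List.any_eq_true] using hk
        have hm2 : ¬ m ≤ 2 := by
          intro h
          rcases (hle 2).mp h with h' | ⟨t', ht', hp'⟩
          · omega
          · have := (pvPrio_le_two _).mp hp'
            simp only [Bool.or_eq_true] at this
            rcases this with (h1 | h2) | h3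
            · exact hrnot t' ht' h1
            · exact hcnot t' ht' (Bool.or_eq_true_iff.mpr h2)
            · exact hknot t' ht' h3
        have : m = 3 := by omega
        simp only [hr, hc, hk, Bool.false_eq_true, if_false]; simp [this, pvCats]
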